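-- pv_equiv track=rewrite | github.com/dratcliff/advent-of-code | 2019/test_sixteen.py | part_two
-- ===== SOURCE A (Python) =====
-- def part_two(input):
--     a = input
--     l = len(a)
--     for i in range(0, 100):
--         b = [None] * l
--         sum = 0
--         for i in range(l-1, -1, -1):
--             sum += a[i]
--             sum = sum % 10
--             b[i] = sum
--         # b = [a%10 for a in b]
--         a = b
--     return b
-- ===== SOURCE B (Python) =====
-- def part_two(input):
--     a = input
--     for _ in range(100):
--         total = sum(a)
--         b = []
--         prefix = 0
--         for x in a:
--             b.append((total - prefix) % 10)
--             prefix += x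
--         a = b
--     return a
-- ===== Notes on version B (the rewrite author's own statement) =====
-- stated objective: alternative
-- what changed: Each of the 100 passes now runs left-to-right, maintaining the grand total and a forward prefix sum and emitting (total - prefix) % 10, instead of accumulating a backward suffix sum into a preallocated list; the output is built by append rather than index assignment.
import Mathlib
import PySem

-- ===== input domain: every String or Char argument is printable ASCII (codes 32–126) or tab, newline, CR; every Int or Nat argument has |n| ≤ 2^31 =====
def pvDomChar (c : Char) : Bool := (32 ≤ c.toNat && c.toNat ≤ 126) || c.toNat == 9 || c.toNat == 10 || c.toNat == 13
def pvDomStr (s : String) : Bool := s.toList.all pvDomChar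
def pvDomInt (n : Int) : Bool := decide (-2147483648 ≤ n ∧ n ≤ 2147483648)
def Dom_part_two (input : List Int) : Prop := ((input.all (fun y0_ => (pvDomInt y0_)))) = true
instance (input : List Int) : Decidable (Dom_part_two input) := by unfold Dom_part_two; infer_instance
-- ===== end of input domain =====

-- B replaces the backward suffix-sum pass of each of A's 100 iterations by a forward
-- prefix-sum pass emitting (total - prefix) % 10; alternative decomposition, same cost.


-- ===== PORT A =====
-- inner loop of A: for i in range(l-1, -1, -1): sum = (sum + a[i]) % 10; b[i] = sum
-- structural countdown on the remaining iteration count n (current index is n-1);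
-- 'None' placeholders are modelled as 0 since every index is overwritten before return.
def pvInnerA (a : List Int) : Nat → Int → List Int → List Int
  | 0, _, b => b
  | n+1, sum, b =>
    let s := PySem.Int.mod (sum + ((PySem.List.pyGet? a (n : Int)).getD 0)) 10
    pvInnerA a n s (b.set n s)

def part_two (input : List Int) : List Int :=
  (List.range 100).foldl
    (fun a _ => pvInnerA a a.length 0 (List.replicate a.length 0)) input

-- ===== PORT B =====
-- inner loop of B: forward pass over a, emitting (total - prefix) % 10 and growing prefix
def pvInnerB (total : Int) : List Int → Int → List Int
  | [], _ => []
  | x :: xs, p => PySem.Int.mod (total - p) 10 :: pvInnerB total xs (p + x)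

def part_two_alt (input : List Int) : List Int :=
  (List.range 100).foldl (fun a _ => pvInnerB a.sum a 0) input

-- ===== PRECONDITION & SPEC =====
def Spec_part_two (input : List Int) (out : List Int) : Prop := out = part_two_alt input
instance (input : List Int) (out : List Int) : Decidable (Spec_part_two input out) := by unfold Spec_part_two; infer_instance

-- ===== CLAIM (what is proved, stated in full; the proofs are below) =====
def Claim_equal_part_two : Prop := ∀ (input : List Int), Dom_part_two input → Spec_part_two input (part_two input)

-- ===== LEMMAS AND PROOFS =====

-- canonical description of one pass: each position gets (its suffix sum + s) % 10
def pvCanon (s : Int) : List Int → List Int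
  | [] => []
  | x :: xs => PySem.Int.mod (x + xs.sum + s) 10 :: pvCanon s xs

theorem pvMod_absorb (x y : Int) :
    PySem.Int.mod (x + PySem.Int.mod y 10) 10 = PySem.Int.mod (x + y) 10 := by
  simp [PySem.Int.mod]

theorem pvCanon_mod (s : Int) (xs : List Int) :
    pvCanon (PySem.Int.mod s 10) xs = pvCanon s xs := by
  induction xs with
  | nil => rfl
  | cons x xs ih =>
    simp only [pvCanon, ih]
    congr 1
    exact pvMod_absorb (x + xs.sum) s

theorem pvCanon_snoc (s z : Int) (ys : List Int) :
    pvCanon s (ys ++ [z]) =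
      pvCanon (s + z) ys ++ [PySem.Int.mod (s + z) 10] := by
  induction ys with
  | nil => simp only [List.nil_append, pvCanon, List.sum_nil]; congr 2; ring
  | cons y ys ih =>
    simp only [List.cons_append, pvCanon, ih, List.sum_append, List.sum_cons,
      List.sum_nil, add_zero]
    congr 2
    ring

theorem pvInnerA_eq (a : List Int) (n : Nat) (sum : Int) (b : List Int)
    (hn : n ≤ a.length) (hb : a.length = b.length) :
    pvInnerA a n sum b = pvCanon sum (a.take n) ++ b.drop n := by
  induction n generalizing sum b with
  | zero => simp [pvInnerA, pvCanon]
  | succ n ih =>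
    have hna : n < a.length := by omega
    have hnb : n < b.length := by omega
    have hget : (PySem.List.pyGet? a (n : Int)).getD 0 = a[n] := by
      simp [PySem.List.pyGet?, PySem.List.pyIdx?, hna]
    simp only [pvInnerA, hget]
    rw [ih _ _ (by omega) (by simpa using hb)]
    have htake : a.take (n+1) = a.take n ++ [a[n]] := by
      rw [List.take_add_one, List.getElem?_eq_getElem hna]
      rfl
    rw [htake, pvCanon_snoc, pvCanon_mod]
    have hdrop : (b.set n (PySem.Int.mod (sum + a[n]) 10)).drop n
        = PySem.Int.mod (sum + a[n]) 10 :: b.drop (n+1) := by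
      apply List.ext_getElem
      · simp; omega
      · intro i h1 h2
        rcases i with _ | i
        · simp [List.getElem_drop]
        · simp only [List.getElem_cons_succ, List.getElem_drop, List.getElem_set]
          rw [if_neg (by omega)]
          congr 1
          omega
    rw [hdrop]
    simp [List.append_assoc]

theorem pvInnerB_eq (t : Int) (xs : List Int) (p : Int) :
    pvInnerB t xs p = pvCanon (t - p - xs.sum) xs := by
  induction xs generalizing p with
  | nil => simp [pvInnerB, pvCanon]
  | cons x xs ih =>
    rw [pvInnerB, ih]
    show _ = pvCanon _ (x :: xs)
    rw [pvCanon]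
    refine congrArg₂ List.cons ?_ ?_
    · congr 1
      simp only [List.sum_cons]
      ring
    · congr 1
      simp only [List.sum_cons]
      ring

theorem pvStep_eq (a : List Int) :
    pvInnerA a a.length 0 (List.replicate a.length 0) = pvInnerB a.sum a 0 := by
  rw [pvInnerA_eq a a.length 0 _ le_rfl (by simp), pvInnerB_eq]
  simp

-- ===== VERDICT (by name: the statement is the Claim_ definition above) =====
theorem part_two_spec : Claim_equal_part_two := by
  intro input _
  unfold Spec_part_two part_two part_two_alt
  induction (List.range 100) generalizing input with
  | nil => rfl
  | cons n ns ih => simp only [List.foldl_cons, pvStep_eq]
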